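-- pv_equiv track=rewrite | github.com/ZhiyuLi-goog/MoE_study | hf/utils.py | strip_padding
-- ===== SOURCE A (Python) =====
-- def strip_padding(tokens_list, padding_token_id):
--     """
--     Strips padding tokens from the beginning and end of each sequence in a list.
--
--     Args:
--     tokens_list (list of list of int): List containing sequences of token IDs.
--     padding_token_id (int): The token ID used for padding.
--
--     Returns:
--     list of list of int: The list of sequences with padding tokens removed.
--     """
--     def strip_single_sequence(sequence):
--         # Remove padding tokens from the start
--         start = 0
--         while start < len(sequence) and sequence[start] == padding_token_id:
--             start += 1
--         # Remove padding tokens from the end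
--         end = len(sequence)
--         while end > start and sequence[end - 1] == padding_token_id:
--             end -= 1
--         return sequence[start:end]
--
--     return [strip_single_sequence(seq) for seq in tokens_list]
-- ===== SOURCE B (Python) =====
-- def strip_padding(tokens_list, padding_token_id):
--     """Strip leading/trailing padding tokens from each sequence.
--
--     One whole-sequence pass per sequence: collect positions of all
--     non-padding tokens, then slice between the extreme positions.
--     """
--     def strip_single_sequence(seq):
--         idx = [i for i, t in enumerate(seq) if t != padding_token_id]
--         if not idx:
--             return []
--         return seq[idx[0]:idx[-1] + 1]
--
--     return [strip_single_sequence(seq) for seq in tokens_list]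
-- ===== Notes on version B (the rewrite author's own statement) =====
-- stated objective: alternative
-- what changed: Replaces the two inward-scanning while loops (find first pad-free index from the left, then from the right) with a single whole-sequence pass that collects every non-padding position and slices between the first and last collected positions.
import Mathlib
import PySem

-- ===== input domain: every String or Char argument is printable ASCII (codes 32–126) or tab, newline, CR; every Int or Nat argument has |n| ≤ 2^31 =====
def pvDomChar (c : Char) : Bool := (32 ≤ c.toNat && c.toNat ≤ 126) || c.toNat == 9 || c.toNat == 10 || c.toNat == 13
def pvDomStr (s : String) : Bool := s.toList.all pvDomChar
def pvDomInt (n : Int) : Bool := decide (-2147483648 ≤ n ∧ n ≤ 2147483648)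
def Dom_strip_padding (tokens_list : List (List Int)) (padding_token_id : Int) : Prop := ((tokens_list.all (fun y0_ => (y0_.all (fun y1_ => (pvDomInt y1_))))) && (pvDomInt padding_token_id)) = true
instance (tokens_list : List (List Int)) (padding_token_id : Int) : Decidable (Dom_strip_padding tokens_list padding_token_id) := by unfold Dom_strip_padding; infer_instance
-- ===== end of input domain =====

-- B replaces the two inward-scanning while loops with one whole-sequence pass collecting non-padding positions and slicing between the extremes (same cost, different decomposition).


-- ===== PORT A =====
def pvStartA (seq : List Int) (p : Int) (start : Nat) : Nat :=
  if h : start < seq.length then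
    if seq[start] = p then pvStartA seq p (start + 1) else start
  else start
termination_by seq.length - start

def pvEndA (seq : List Int) (p : Int) (start : Nat) (e : Nat) : Nat :=
  if _h : start < e then
    if h2 : e - 1 < seq.length then   -- bounds guard totalizing seq[e-1]; always true for the loop's real arguments (e ≤ len(seq))
      if seq[e - 1] = p then pvEndA seq p start (e - 1) else e
    else e
  else e
termination_by e

def pvStripSingleA (seq : List Int) (p : Int) : List Int :=
  let start := pvStartA seq p 0
  let e := pvEndA seq p start seq.length
  PySem.List.slice seq (some (start : Int)) (some (e : Int))

def strip_padding (tokens_list : List (List Int)) (padding_token_id : Int) : List (List Int) :=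
  tokens_list.map (fun seq => pvStripSingleA seq padding_token_id)


-- ===== PORT B =====
def pvIdxB (seq : List Int) (p : Int) : List Int :=
  ((PySem.List.enumerate seq 0).filter (fun it => it.2 != p)).map (fun it => it.1)

def pvStripSingleB (seq : List Int) (p : Int) : List Int :=
  match pvIdxB seq p with
  | [] => []
  | i0 :: rest => PySem.List.slice seq (some i0) (some ((i0 :: rest).getLast (by simp) + 1))

def strip_padding_alt (tokens_list : List (List Int)) (padding_token_id : Int) : List (List Int) :=
  tokens_list.map (fun seq => pvStripSingleB seq padding_token_id)


-- ===== PRECONDITION & SPEC =====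
def Spec_strip_padding (tokens_list : List (List Int)) (padding_token_id : Int) (out : List (List Int)) : Prop := out = strip_padding_alt tokens_list padding_token_id
instance (tokens_list : List (List Int)) (padding_token_id : Int) (out : List (List Int)) : Decidable (Spec_strip_padding tokens_list padding_token_id out) := by unfold Spec_strip_padding; infer_instance

-- ===== CLAIM (what is proved, stated in full; the proofs are below) =====
def Claim_equal_strip_padding : Prop := ∀ (tokens_list : List (List Int)) (padding_token_id : Int), Dom_strip_padding tokens_list padding_token_id → Spec_strip_padding tokens_list padding_token_id (strip_padding tokens_list padding_token_id)

-- ===== LEMMAS AND PROOFS =====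

-- proof helper: pvIdxB generalized over the enumerate start index
def pvIdxBFrom (seq : List Int) (p : Int) (s : Int) : List Int :=
  ((PySem.List.enumerate seq s).filter (fun it => it.2 != p)).map (fun it => it.1)

theorem pvIdxB_eq_from (seq : List Int) (p : Int) : pvIdxB seq p = pvIdxBFrom seq p 0 := rfl

-- number of leading / trailing padding tokens
def padL (seq : List Int) (p : Int) : Nat := (seq.takeWhile (fun x => x == p)).length
def padR (seq : List Int) (p : Int) : Nat := (seq.reverse.takeWhile (fun x => x == p)).length

theorem tw_len_le {a : Type} (P : a -> Bool) (l : List a) : (l.takeWhile P).length <= l.length :=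
  List.Sublist.length_le (List.takeWhile_sublist P)

theorem tw_getElem {a : Type} (P : a -> Bool) (l : List a) (i : Nat)
    (h : i < (l.takeWhile P).length) (h2 : i < l.length) : P l[i] = true := by
  induction l generalizing i with
  | nil => simp at h2
  | cons x xs ih =>
    by_cases hp : P x
    · cases i with
      | zero => simpa using hp
      | succ j =>
        simp only [List.takeWhile_cons, hp, if_true, List.length_cons] at h
        exact ih j (by omega) (by simpa using h2)
    · simp [List.takeWhile_cons, hp] at h

theorem tw_stop {a : Type} (P : a -> Bool) (l : List a)
    (h : (l.takeWhile P).length < l.length) :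
    P (l[(l.takeWhile P).length]'h) = false := by
  induction l with
  | nil => simp at h
  | cons x xs ih =>
    by_cases hp : P x
    · simp only [List.takeWhile_cons, hp, if_true, List.length_cons] at h ⊢
      simpa using ih (by omega)
    · simpa [List.takeWhile_cons, hp] using hp

theorem tw_len_eq_iff {a : Type} (P : a -> Bool) (l : List a) :
    (l.takeWhile P).length = l.length ↔ ∀ x ∈ l, P x = true := by
  constructor
  · intro h
    exact List.takeWhile_eq_self_iff.mp (List.Sublist.eq_of_length (List.takeWhile_sublist P) h)
  · intro h
    rw [List.takeWhile_eq_self_iff.mpr h]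

theorem padL_lt_iff (seq : List Int) (p : Int) :
    padL seq p < seq.length ↔ ¬ (∀ x ∈ seq, x = p) := by
  unfold padL
  have hle := tw_len_le (fun x => x == p) seq
  have hiff := tw_len_eq_iff (fun x => x == p) seq
  simp only [beq_iff_eq] at hiff
  constructor
  · intro h hall
    have := hiff.mpr hall
    omega
  · intro h
    rcases lt_or_eq_of_le hle with h2 | h2
    · exact h2
    · exact absurd (hiff.mp h2) h

theorem padR_lt_iff (seq : List Int) (p : Int) :
    padR seq p < seq.length ↔ ¬ (∀ x ∈ seq, x = p) := by
  unfold padR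
  have hle := tw_len_le (fun x => x == p) seq.reverse
  have hiff := tw_len_eq_iff (fun x => x == p) seq.reverse
  simp only [beq_iff_eq, List.mem_reverse, List.length_reverse] at hiff
  simp only [List.length_reverse] at hle ⊢
  constructor
  · intro h hall
    have := hiff.mpr hall
    omega
  · intro h
    rcases lt_or_eq_of_le hle with h2 | h2
    · exact h2
    · exact absurd (hiff.mp h2) h

-- every index in the trailing padding region holds p
theorem pad_tail (seq : List Int) (p : Int) (i : Nat)
    (h1 : seq.length - padR seq p ≤ i) (h2 : i < seq.length) : seq[i]'h2 = p := by
  have hpadle : padR seq p ≤ seq.length := by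
    have := tw_len_le (fun x => x == p) seq.reverse
    unfold padR; simpa using this
  have hr : seq.length - 1 - i < (seq.reverse.takeWhile (fun x => x == p)).length := by
    unfold padR at h1; omega
  have hlen : seq.length - 1 - i < seq.reverse.length := by simp; omega
  have h0 := tw_getElem (fun x => x == p) seq.reverse (seq.length - 1 - i) hr hlen
  rw [List.getElem_reverse] at h0
  rw [getElem_congr_idx (show seq.length - 1 - (seq.length - 1 - i) = i by omega)] at h0
  simpa using h0

-- the last non-padding element is not p
theorem last_nonpad (seq : List Int) (p : Int) (h : padR seq p < seq.length) :
    ¬ seq[seq.length - padR seq p - 1]'(by omega) = p := by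
  intro hc
  have hlt : (seq.reverse.takeWhile (fun x => x == p)).length < seq.reverse.length := by
    unfold padR at h; simpa using h
  have h0 := tw_stop (fun x => x == p) seq.reverse hlt
  rw [List.getElem_reverse] at h0
  rw [getElem_congr_idx
      (show seq.length - 1 - (List.takeWhile (fun x => x == p) seq.reverse).length
         = seq.length - padR seq p - 1 from by unfold padR; omega)] at h0
  simp only [beq_eq_false_iff_ne, ne_eq] at h0
  exact h0 hc

-- ===== A-side characterisation =====
theorem startA_spec (seq : List Int) (p : Int) :
    ∀ start, pvStartA seq p start = start + padL (List.drop start seq) p := by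
  suffices H : ∀ n start, seq.length - start ≤ n →
      pvStartA seq p start = start + padL (List.drop start seq) p from
    fun start => H (seq.length - start) start le_rfl
  intro n
  induction n with
  | zero =>
    intro start h
    rw [pvStartA, dif_neg (by omega), List.drop_of_length_le (by omega)]
    simp [padL]
  | succ n ihn =>
    intro start h
    rw [pvStartA]
    by_cases hlt : start < seq.length
    · rw [dif_pos hlt]
      have hd : seq[start] :: List.drop (start + 1) seq = List.drop start seq :=
        List.getElem_cons_drop hlt
      by_cases hp : seq[start] = p
      · rw [if_pos hp, ihn (start + 1) (by omega), ← hd]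
        simp only [padL, List.takeWhile_cons, hp, beq_self_eq_true, if_true, List.length_cons]
        omega
      · rw [if_neg hp, ← hd]
        simp [padL, List.takeWhile_cons, hp]
    · rw [dif_neg hlt, List.drop_of_length_le (by omega)]
      simp [padL]

theorem endA_spec (seq : List Int) (p : Int) (start : Nat)
    (hs : start < seq.length - padR seq p) :
    ∀ e, seq.length - padR seq p ≤ e → e ≤ seq.length →
      pvEndA seq p start e = seq.length - padR seq p := by
  intro e
  induction e using Nat.strong_induction_on with
  | _ e ih =>
    intro hle hlen
    have h1 : start < e := by omega
    have he1 : e - 1 < seq.length := by omega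
    rw [pvEndA, dif_pos h1, dif_pos he1]
    by_cases heq : e = seq.length - padR seq p
    · have hnp := last_nonpad seq p (by omega)
      rw [getElem_congr_idx (show e - 1 = seq.length - padR seq p - 1 by omega)]
      rw [if_neg hnp]
      exact heq
    · have hp : seq[e - 1]'he1 = p := pad_tail seq p (e - 1) (by omega) he1
      rw [if_pos hp]
      exact ih (e - 1) (by omega) (by omega) (by omega)

-- ===== B-side characterisation =====
theorem J_cons (x : Int) (xs : List Int) (p : Int) (s : Int) :
    pvIdxBFrom (x :: xs) p s =
      if x = p then pvIdxBFrom xs p (s + 1) else s :: pvIdxBFrom xs p (s + 1) := by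
  by_cases h : x = p <;>
    simp [pvIdxBFrom, PySem.List.enumerate_cons, List.filter_cons, h]

theorem J_nil_iff (seq : List Int) (p : Int) :
    ∀ s, (pvIdxBFrom seq p s = [] ↔ ∀ x ∈ seq, x = p) := by
  induction seq with
  | nil => intro s; simp [pvIdxBFrom]
  | cons x xs ih =>
    intro s
    rw [J_cons]
    by_cases h : x = p <;> simp [h, ih]

theorem J_head (seq : List Int) (p : Int) :
    ∀ s, (pvIdxBFrom seq p s).head? =
      if padL seq p < seq.length then some (s + (padL seq p : Int)) else none := by
  induction seq with
  | nil => intro s; simp [pvIdxBFrom, padL]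
  | cons x xs ih =>
    intro s
    rw [J_cons]
    by_cases h : x = p
    · have hpadL : padL (x :: xs) p = padL xs p + 1 := by
        simp [padL, List.takeWhile_cons, h]
      rw [if_pos h, ih (s + 1), hpadL]
      by_cases hlt : padL xs p < xs.length
      · rw [if_pos hlt, if_pos (by simp only [List.length_cons]; omega)]
        simp only [Option.some.injEq]
        push_cast
        ring
      · rw [if_neg hlt, if_neg (by simp only [List.length_cons]; omega)]
    · have hpadL : padL (x :: xs) p = 0 := by
        simp [padL, List.takeWhile_cons, h]
      rw [if_neg h, hpadL, if_pos (by simp)]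
      simp

theorem padR_cons (x : Int) (xs : List Int) (p : Int) :
    padR (x :: xs) p =
      if ∀ y ∈ xs, y = p then (if x = p then xs.length + 1 else xs.length)
      else padR xs p := by
  unfold padR
  rw [List.reverse_cons, List.takeWhile_append]
  by_cases hall : ∀ y ∈ xs, y = p
  · have hlen : (xs.reverse.takeWhile (fun y => y == p)).length = xs.reverse.length := by
      rw [tw_len_eq_iff]; intro y hy; simp only [beq_iff_eq]; exact hall y (by simpa using hy)
    rw [if_pos hall, if_pos (by simpa using hlen)]
    by_cases h : x = p <;> simp [List.takeWhile_cons, h]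
  · have hlen : ¬ (xs.reverse.takeWhile (fun y => y == p)).length = xs.reverse.length := by
      rw [tw_len_eq_iff]
      intro hc
      exact hall (fun y hy => by simpa using hc y (by simpa using hy))
    rw [if_neg hall, if_neg (by simpa using hlen)]

theorem J_last (seq : List Int) (p : Int) :
    ∀ s, (pvIdxBFrom seq p s).getLast? =
      if padR seq p < seq.length then some (s + ((seq.length - 1 - padR seq p : Nat) : Int))
      else none := by
  induction seq with
  | nil => intro s; simp [pvIdxBFrom, padR]
  | cons x xs ih =>
    intro s
    rw [J_cons, padR_cons]
    by_cases hall : ∀ y ∈ xs, y = p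
    · have hJ : pvIdxBFrom xs p (s + 1) = [] := (J_nil_iff xs p (s + 1)).mpr hall
      by_cases h : x = p
      · simp only [if_pos h, if_pos hall, hJ, List.getLast?_nil]
        rw [if_neg (by simp only [List.length_cons]; omega)]
      · simp only [if_neg h, if_pos hall, hJ]
        rw [if_pos (by simp only [List.length_cons]; omega)]
        simp
    · have hJ : pvIdxBFrom xs p (s + 1) ≠ [] := by
        rw [ne_eq, J_nil_iff]; exact hall
      have hR : padR xs p < xs.length := (padR_lt_iff xs p).mpr hall
      have hlast : (pvIdxBFrom xs p (s + 1)).getLast? =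
          some ((s + 1) + ((xs.length - 1 - padR xs p : Nat) : Int)) := by
        rw [ih (s + 1), if_pos hR]
      by_cases h : x = p
      · rw [if_pos h, if_neg hall, hlast, if_pos (by simp only [List.length_cons]; omega)]
        simp only [Option.some.injEq, List.length_cons]
        omega
      · rw [if_neg h, if_neg hall]
        cases hc : pvIdxBFrom xs p (s + 1) with
        | nil => exact absurd hc hJ
        | cons a l =>
          rw [List.getLast?_cons_cons, ← hc, hlast, if_pos (by simp only [List.length_cons]; omega)]
          simp only [Option.some.injEq, List.length_cons]
          omega

-- per-sequence key lemma
theorem stripSingle_eq (seq : List Int) (p : Int) :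
    pvStripSingleA seq p = pvStripSingleB seq p := by
  by_cases hall : ∀ x ∈ seq, x = p
  · have hL : padL seq p = seq.length := by
      unfold padL
      rw [tw_len_eq_iff]
      intro x hx; simpa using hall x hx
    have hstart : pvStartA seq p 0 = seq.length := by
      have := startA_spec seq p 0
      simpa [hL] using this
    have hend : pvEndA seq p seq.length seq.length = seq.length := by
      rw [pvEndA, dif_neg (by omega)]
    have hB : pvIdxB seq p = [] := by
      rw [pvIdxB_eq_from, J_nil_iff]; exact hall
    simp only [pvStripSingleA, pvStripSingleB, hstart, hend, hB]
    simp [PySem.List.slice_natCast]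
  · have hLlt : padL seq p < seq.length := (padL_lt_iff seq p).mpr hall
    have hRlt : padR seq p < seq.length := (padR_lt_iff seq p).mpr hall
    have hstart : pvStartA seq p 0 = padL seq p := by
      have := startA_spec seq p 0
      simpa using this
    have hsep : padL seq p < seq.length - padR seq p := by
      by_contra hc
      push_neg at hc
      have hp := pad_tail seq p (padL seq p) (by omega) hLlt
      have hnp := tw_stop (fun x => x == p) seq (by unfold padL at hLlt; exact hLlt)
      simp only [beq_eq_false_iff_ne, ne_eq] at hnp
      exact hnp hp
    have hend : pvEndA seq p (padL seq p) seq.length = seq.length - padR seq p :=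
      endA_spec seq p _ hsep seq.length (by omega) le_rfl
    have hhead := J_head seq p 0
    have hlastq := J_last seq p 0
    rw [if_pos hLlt] at hhead
    rw [if_pos hRlt] at hlastq
    simp only [zero_add] at hhead hlastq
    cases hc : pvIdxB seq p with
    | nil =>
      rw [pvIdxB_eq_from, J_nil_iff] at hc
      exact absurd hc hall
    | cons i0 rest =>
      have hc' : pvIdxBFrom seq p 0 = i0 :: rest := by rw [← pvIdxB_eq_from]; exact hc
      have hi0 : i0 = (padL seq p : Int) := by
        rw [hc'] at hhead; simpa using hhead
      have hlast : (i0 :: rest).getLast (by simp) = ((seq.length - 1 - padR seq p : Nat) : Int) := by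
        rw [hc'] at hlastq
        rw [List.getLast?_eq_getLast (l := i0 :: rest) (by simp)] at hlastq
        simpa using hlastq
      have hBval : pvStripSingleB seq p =
          PySem.List.slice seq (some i0) (some ((i0 :: rest).getLast (by simp) + 1)) := by
        unfold pvStripSingleB
        rw [hc]
      rw [hBval, hlast, hi0]
      simp only [pvStripSingleA, hstart, hend]
      congr 1
      simp only [Option.some.injEq]
      omega

-- ===== VERDICT (by name: the statement is the Claim_ definition above) =====
theorem strip_padding_spec : Claim_equal_strip_padding := by
  intro tl p _
  unfold Spec_strip_padding strip_padding strip_padding_alt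
  exact List.map_congr_left (fun seq _ => stripSingle_eq seq p)
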